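-- pv_equiv track=rewrite | github.com/mevljas/ieps-pa-3 | implementation-indexing/basic_search/retrival.py | find_snippet
-- ===== SOURCE A (Python) =====
-- def find_snippet(document_text: [str], indexes: [int]) -> str:
--     result = []
--     new_indexes = set()
--     for index in indexes:
--         new_indexes = new_indexes.union(set(range(index - 3, index + 1)))
--         new_indexes = new_indexes.union(set(range(index + 1, index + 4)))
--
--     new_indexes = list(new_indexes)
--     new_indexes.sort()
--     for i in range(0, len(new_indexes)):
--         current_index = new_indexes[i]
--         if i == 0 and current_index > 0:
--             result.append('...')
--         elif i > 0 and current_index - new_indexes[i - 1] > 1: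
--             result.append('...')
--         result.append(document_text[new_indexes[i]])
--
--     if new_indexes[-1] != len(document_text) - 1:
--         result.append('...')
--
--     return " ".join(result)
-- ===== SOURCE B (Python) =====
-- def find_snippet(document_text: [str], indexes: [int]) -> str:
--     # Sort the match positions, widen each to the interval [i-3, i+3] and merge
--     # overlapping/adjacent intervals into runs in one linear pass; then emit the
--     # runs with '...' separators instead of sorting a materialised position set.
--     runs = []
--     for i in sorted(indexes):
--         lo, hi = i - 3, i + 3
--         if runs and lo <= runs[-1][1] + 1:
--             runs[-1][1] = max(runs[-1][1], hi)
--         else: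
--             runs.append([lo, hi])
--     parts = []
--     for k, (lo, hi) in enumerate(runs):
--         if (k == 0 and lo > 0) or k > 0:
--             parts.append('...')
--         for p in range(lo, hi + 1):
--             parts.append(document_text[p])
--     if runs[-1][1] != len(document_text) - 1:
--         parts.append('...')
--     return " ".join(parts)
-- ===== Notes on version B (the rewrite author's own statement) =====
-- stated objective: alternative
-- what changed: Instead of materialising the set of all positions i-3..i+3, sorting it and scanning for gaps, B sorts the n match indexes, merges the widened intervals [i-3,i+3] into runs in one linear pass, and emits each run's range directly with '...' between runs.
import Mathlib
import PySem

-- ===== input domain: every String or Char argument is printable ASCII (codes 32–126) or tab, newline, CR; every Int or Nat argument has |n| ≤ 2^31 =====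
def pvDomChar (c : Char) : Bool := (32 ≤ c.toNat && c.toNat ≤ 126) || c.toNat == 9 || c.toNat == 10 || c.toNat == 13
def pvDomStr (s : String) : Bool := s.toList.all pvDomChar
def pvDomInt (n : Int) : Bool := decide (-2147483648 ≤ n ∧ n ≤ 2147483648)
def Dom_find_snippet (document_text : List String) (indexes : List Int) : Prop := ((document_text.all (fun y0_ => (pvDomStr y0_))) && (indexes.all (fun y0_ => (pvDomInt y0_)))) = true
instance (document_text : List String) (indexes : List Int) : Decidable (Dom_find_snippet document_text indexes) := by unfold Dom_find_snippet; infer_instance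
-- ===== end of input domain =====

-- B merges the sorted match indexes' widened intervals [i-3,i+3] into runs and emits each run
-- directly, instead of A's sort-the-materialised-position-set-and-scan-for-gaps; return values only.

-- ===== PORT A =====
def find_snippet (document_text : List String) (indexes : List Int) : String :=
  let new_indexes : PySem.Set Int :=
    indexes.foldl (fun s index =>
      let s := PySem.Set.union s (PySem.Set.ofList (PySem.List.pyRange (index - 3) (index + 1) 1))
      PySem.Set.union s (PySem.Set.ofList (PySem.List.pyRange (index + 1) (index + 4) 1)))
      PySem.Set.empty
  let ni := PySem.List.sorted new_indexes (fun x => x) false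
  let result := (PySem.List.pyRange 0 ni.length 1).foldl (fun result i =>
      let current_index := PySem.List.pyGetD ni i 0
      let result :=
        if i = 0 ∧ current_index > 0 then result ++ ["..."]
        else if i > 0 ∧ current_index - PySem.List.pyGetD ni (i - 1) 0 > 1 then result ++ ["..."]
        else result
      result ++ [(PySem.List.pyGet? document_text current_index).getD ""]) []
  let result := if PySem.List.pyGetD ni (-1) 0 ≠ (document_text.length : Int) - 1 then result ++ ["..."] else result
  PySem.Str.join " " result

-- ===== PORT B =====
-- Python B mutates runs[-1]; the port keeps the run list in REVERSE order (head = last run)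
-- during the merge fold and reverses it afterwards.
def bMergeStep (runs : List (Int × Int)) (i : Int) : List (Int × Int) :=
  match runs with
  | [] => [(i - 3, i + 3)]
  | r :: rest =>
      if i - 3 ≤ r.2 + 1 then (r.1, max r.2 (i + 3)) :: rest
      else (i - 3, i + 3) :: r :: rest

def find_snippet_alt (document_text : List String) (indexes : List Int) : String :=
  let runs := ((PySem.List.sorted indexes (fun x => x) false).foldl bMergeStep []).reverse
  let parts := (PySem.List.enumerate runs).foldl (fun parts kr =>
      let parts := if (kr.1 = 0 ∧ kr.2.1 > 0) ∨ kr.1 > 0 then parts ++ ["..."] else parts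
      parts ++ (PySem.List.pyRange kr.2.1 (kr.2.2 + 1) 1).map
        (fun p => (PySem.List.pyGet? document_text p).getD "")) []
  let parts := if ((runs.getLast?).map (·.2)).getD 0 ≠ (document_text.length : Int) - 1
               then parts ++ ["..."] else parts
  PySem.Str.join " " parts

-- ===== PRECONDITION & SPEC =====
-- Pre_ excludes exactly the inputs where Python A raises IndexError: empty indexes
-- (new_indexes[-1]) and any widened position outside Python's legal index range of
-- document_text (document_text[p] for p in [i-3, i+3]); negative in-range positions
-- (Python wraparound) stay inside Pre_ and both programs reproduce them.
def Pre_find_snippet (document_text : List String) (indexes : List Int) : Prop :=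
  indexes ≠ [] ∧ ∀ i ∈ indexes,
    -(document_text.length : Int) ≤ i - 3 ∧ i + 3 < (document_text.length : Int)
instance (document_text : List String) (indexes : List Int) : Decidable (Pre_find_snippet document_text indexes) := by unfold Pre_find_snippet; infer_instance

def pvWitness_find_snippet : List String × List Int :=
  (["the", "quick", "brown", "fox", "jumps", "over", "the", "lazy", "dog", "today"], [4, 5])

def Spec_find_snippet (document_text : List String) (indexes : List Int) (out : String) : Prop := out = find_snippet_alt document_text indexes
instance (document_text : List String) (indexes : List Int) (out : String) : Decidable (Spec_find_snippet document_text indexes out) := by unfold Spec_find_snippet; infer_instance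

-- ===== CLAIM (what is proved, stated in full; the proofs are below) =====
def Claim_equal_find_snippet : Prop := ∀ (document_text : List String) (indexes : List Int), Dom_find_snippet document_text indexes → Pre_find_snippet document_text indexes → Spec_find_snippet document_text indexes (find_snippet document_text indexes)

-- ===== LEMMAS AND PROOFS =====

-- ---- proof-side emission functions ----

def tailEmit (w : Int → String) (prev : Int) : List Int → List String
  | [] => []
  | c :: t => ((if c - prev > 1 then ["..."] else []) ++ [w c]) ++ tailEmit w c t

def emitA (w : Int → String) : List Int → List String
  | [] => []
  | h :: t => ((if h > 0 then ["..."] else []) ++ [w h]) ++ tailEmit w h t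

def emitRun (w : Int → String) (lo hi : Int) : List String :=
  (PySem.List.pyRange lo (hi + 1) 1).map w

def restB (w : Int → String) : List (Int × Int) → List String
  | [] => []
  | r :: rest => (["..."] ++ emitRun w r.1 r.2) ++ restB w rest

def partsB (w : Int → String) : List (Int × Int) → List String
  | [] => []
  | r :: rest => ((if r.1 > 0 then ["..."] else []) ++ emitRun w r.1 r.2) ++ restB w rest

-- coverage of a position by the widened intervals of a list of indexes
def Cov (l : List Int) (p : Int) : Prop := ∃ i ∈ l, i - 3 ≤ p ∧ p ≤ i + 3

-- ---- A side: the built set has nodup elements covering exactly Cov indexes ----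

lemma setA_spec (l : List Int) (acc : PySem.Set Int) (hnd : acc.Nodup) :
    (l.foldl (fun s index =>
      PySem.Set.union
        (PySem.Set.union s (PySem.Set.ofList (PySem.List.pyRange (index - 3) (index + 1) 1)))
        (PySem.Set.ofList (PySem.List.pyRange (index + 1) (index + 4) 1))) acc).Nodup ∧
    ∀ p, p ∈ (l.foldl (fun s index =>
      PySem.Set.union
        (PySem.Set.union s (PySem.Set.ofList (PySem.List.pyRange (index - 3) (index + 1) 1)))
        (PySem.Set.ofList (PySem.List.pyRange (index + 1) (index + 4) 1))) acc) ↔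
      p ∈ acc ∨ Cov l p := by
  induction l generalizing acc with
  | nil => simpa [Cov] using hnd
  | cons i l' ih =>
    simp only [List.foldl_cons]
    obtain ⟨h1, h2⟩ := ih
      (PySem.Set.union (PySem.Set.union acc (PySem.Set.ofList (PySem.List.pyRange (i - 3) (i + 1) 1)))
        (PySem.Set.ofList (PySem.List.pyRange (i + 1) (i + 4) 1)))
      (PySem.Set.nodup_union _ _ (PySem.Set.nodup_union _ _ hnd))
    refine ⟨h1, fun p => ?_⟩
    rw [h2 p]
    have hmem : p ∈ PySem.Set.union (PySem.Set.union acc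
        (PySem.Set.ofList (PySem.List.pyRange (i - 3) (i + 1) 1)))
        (PySem.Set.ofList (PySem.List.pyRange (i + 1) (i + 4) 1)) ↔
        p ∈ acc ∨ (i - 3 ≤ p ∧ p ≤ i + 3) := by
      simp only [PySem.Set.mem_union, PySem.Set.mem_ofList, PySem.List.mem_pyRange_one]
      constructor
      · rintro ((h | h) | h)
        · exact Or.inl h
        · exact Or.inr (by omega)
        · exact Or.inr (by omega)
      · rintro (h | h)
        · exact Or.inl (Or.inl h)
        · by_cases hp : p < i + 1
          · exact Or.inl (Or.inr (by omega))
          · exact Or.inr (by omega)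
    rw [hmem]
    have hcov : Cov (i :: l') p ↔ (i - 3 ≤ p ∧ p ≤ i + 3) ∨ Cov l' p := by
      simp [Cov]
    rw [hcov]
    tauto

-- ---- A side: the indexed gap loop is emitA ----

lemma loopA_go (w : Int → String) (ni : List Int) (k : Nat) (hk : 1 ≤ k) (h : k ≤ ni.length)
    (acc : List String) :
    (PySem.List.pyRange (k : Int) ni.length 1).foldl (fun result i =>
      (if i = 0 ∧ PySem.List.pyGetD ni i 0 > 0 then result ++ ["..."]
       else if i > 0 ∧ PySem.List.pyGetD ni i 0 - PySem.List.pyGetD ni (i - 1) 0 > 1 then result ++ ["..."]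
       else result) ++ [w (PySem.List.pyGetD ni i 0)]) acc
    = acc ++ tailEmit w (ni.getD (k - 1) 0) (ni.drop k) := by
  induction hn : ni.length - k generalizing k acc with
  | zero =>
    have hk' : k = ni.length := by omega
    rw [PySem.List.pyRange_one_eq_nil (by omega)]
    rw [List.drop_of_length_le (by omega)]
    simp [tailEmit]
  | succ n ih =>
    have hklt : k < ni.length := by omega
    rw [PySem.List.pyRange_one_cons (by exact_mod_cast hklt)]
    simp only [List.foldl_cons]
    have hne0 : ¬ ((k : Int) = 0 ∧ PySem.List.pyGetD ni (k : Int) 0 > 0) := by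
      intro hc; omega
    have hcast : (k : Int) - 1 = ((k - 1 : Nat) : Int) := by omega
    rw [if_neg hne0, hcast, PySem.List.pyGetD_natCast, PySem.List.pyGetD_natCast]
    have hgetk : ni.getD k 0 = ni[k] := List.getD_eq_getElem ni 0 hklt
    have hdrop : ni.drop k = ni[k] :: ni.drop (k + 1) := List.drop_eq_getElem_cons hklt
    have hkk : ((k : Int) + 1) = ((k + 1 : Nat) : Int) := by omega
    rw [hkk, ih (k + 1) (by omega) (by omega) _ (by omega)]
    rw [hdrop]
    simp only [tailEmit, Nat.add_sub_cancel, hgetk]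
    by_cases hgap : ni[k] - ni.getD (k - 1) 0 > 1
    · rw [if_pos ⟨by omega, hgap⟩, if_pos hgap]; simp
    · rw [if_neg (fun hc => hgap hc.2), if_neg hgap]; simp

lemma loopA_eq (w : Int → String) (ni : List Int) :
    (PySem.List.pyRange 0 ni.length 1).foldl (fun result i =>
      (if i = 0 ∧ PySem.List.pyGetD ni i 0 > 0 then result ++ ["..."]
       else if i > 0 ∧ PySem.List.pyGetD ni i 0 - PySem.List.pyGetD ni (i - 1) 0 > 1 then result ++ ["..."]
       else result) ++ [w (PySem.List.pyGetD ni i 0)]) []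
    = emitA w ni := by
  cases ni with
  | nil => simp [emitA, PySem.List.pyRange_one_eq_nil]
  | cons h t =>
    have hlen : (0 : Int) < (h :: t).length := by simp
    rw [PySem.List.pyRange_one_cons hlen]
    simp only [List.foldl_cons]
    rw [show ((0 : Int) + 1) = ((1 : Nat) : Int) by norm_num]
    rw [loopA_go w (h :: t) 1 le_rfl (by simp)]
    have hget0 : PySem.List.pyGetD (h :: t) 0 0 = h := by
      simp [PySem.List.pyGetD_zero_cons]
    simp only [emitA, hget0]
    by_cases hh : h > 0 <;> simp [hh, List.getD]

-- ---- B side: the enumerate loop is partsB ----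

lemma loopB_go (w : Int → String) (rest : List (Int × Int)) (s : Int) (hs : 1 ≤ s)
    (acc : List String) :
    (PySem.List.enumerate rest s).foldl (fun parts kr =>
      (if (kr.1 = 0 ∧ kr.2.1 > 0) ∨ kr.1 > 0 then parts ++ ["..."] else parts) ++
      (PySem.List.pyRange kr.2.1 (kr.2.2 + 1) 1).map w) acc
    = acc ++ restB w rest := by
  induction rest generalizing s acc with
  | nil => simp [restB, PySem.List.enumerate]
  | cons r t ih =>
    rw [PySem.List.enumerate_cons]
    simp only [List.foldl_cons]
    have hcond : ((s = 0 ∧ r.1 > 0) ∨ s > 0) := Or.inr (by omega)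
    rw [if_pos hcond, ih (s + 1) (by omega)]
    simp [restB, emitRun]

lemma loopB_eq (w : Int → String) (runs : List (Int × Int)) :
    (PySem.List.enumerate runs).foldl (fun parts kr =>
      (if (kr.1 = 0 ∧ kr.2.1 > 0) ∨ kr.1 > 0 then parts ++ ["..."] else parts) ++
      (PySem.List.pyRange kr.2.1 (kr.2.2 + 1) 1).map w) []
    = partsB w runs := by
  cases runs with
  | nil => simp [partsB, PySem.List.enumerate]
  | cons r t =>
    have : PySem.List.enumerate (r :: t) = (0, r) :: PySem.List.enumerate t 1 := by
      rw [PySem.List.enumerate_cons]; norm_num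
    rw [this]
    simp only [List.foldl_cons]
    rw [loopB_go w t 1 le_rfl]
    by_cases hr : r.1 > 0 <;> simp [partsB, emitRun, hr]

-- ---- merge fold invariant ----

lemma merge_go (l : List Int) (acc : List (Int × Int))
    (hsorted : l.Pairwise (· ≤ ·))
    (hpw : acc.Pairwise (fun r r' => r'.2 + 2 ≤ r.1))
    (hle : ∀ r ∈ acc, r.1 ≤ r.2)
    (hlo : ∀ r ∈ acc, ∀ x ∈ l, r.1 ≤ x - 3) :
    (l.foldl bMergeStep acc).Pairwise (fun r r' => r'.2 + 2 ≤ r.1) ∧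
    (∀ r ∈ l.foldl bMergeStep acc, r.1 ≤ r.2) ∧
    (l.foldl bMergeStep acc = [] ↔ acc = [] ∧ l = []) ∧
    (∀ p, (∃ r ∈ l.foldl bMergeStep acc, r.1 ≤ p ∧ p ≤ r.2) ↔
          (∃ r ∈ acc, r.1 ≤ p ∧ p ≤ r.2) ∨ Cov l p) := by
  induction l generalizing acc with
  | nil =>
    refine ⟨hpw, hle, ?_, fun p => ?_⟩
    · simp
    · simp [Cov]
  | cons i l' ih =>
    obtain ⟨hsle, hsorted'⟩ := List.pairwise_cons.mp hsorted
    simp only [List.foldl_cons]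
    -- properties of the one-step result
    have hstep : (bMergeStep acc i).Pairwise (fun r r' => r'.2 + 2 ≤ r.1) ∧
        (∀ r ∈ bMergeStep acc i, r.1 ≤ r.2) ∧
        (∀ r ∈ bMergeStep acc i, ∀ x ∈ l', r.1 ≤ x - 3) ∧
        (bMergeStep acc i ≠ []) ∧
        (∀ p, (∃ r ∈ bMergeStep acc i, r.1 ≤ p ∧ p ≤ r.2) ↔
              (∃ r ∈ acc, r.1 ≤ p ∧ p ≤ r.2) ∨ (i - 3 ≤ p ∧ p ≤ i + 3)) := by
      match hacc : acc with
      | [] =>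
        refine ⟨by simp [bMergeStep], by simp [bMergeStep]; omega,
          by simp [bMergeStep]; intro x hx; have := hsle x hx; omega,
          by simp [bMergeStep], fun p => by simp [bMergeStep]⟩
      | r :: rest =>
        obtain ⟨hr_rest, hpw_rest⟩ := List.pairwise_cons.mp hpw
        have hrle : r.1 ≤ r.2 := hle r List.mem_cons_self
        have hr_lo : r.1 ≤ i - 3 := hlo r List.mem_cons_self i List.mem_cons_self
        by_cases hmerge : i - 3 ≤ r.2 + 1
        · have hbm : bMergeStep (r :: rest) i = (r.1, max r.2 (i + 3)) :: rest := by
            simp [bMergeStep, hmerge]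
          rw [hbm]
          refine ⟨List.pairwise_cons.mpr ⟨hr_rest, hpw_rest⟩, ?_, ?_, by simp, fun p => ?_⟩
          · intro r' hr'
            rcases List.mem_cons.mp hr' with h | h
            · subst h; simp; left; omega
            · exact hle r' (List.mem_cons_of_mem _ h)
          · intro r' hr' x hx
            rcases List.mem_cons.mp hr' with h | h
            · subst h; simp only; have := hsle x hx; omega
            · exact hlo r' (List.mem_cons_of_mem _ h) x (List.mem_cons_of_mem _ hx)
          · constructor
            · rintro ⟨r', hr', hp1, hp2⟩
              rcases List.mem_cons.mp hr' with h | h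
              · subst h
                simp only at hp1 hp2
                by_cases hc : p ≤ r.2
                · exact Or.inl ⟨r, List.mem_cons_self, hp1, hc⟩
                · right
                  constructor <;> omega
              · exact Or.inl ⟨r', List.mem_cons_of_mem _ h, hp1, hp2⟩
            · rintro (⟨r', hr', hp1, hp2⟩ | ⟨hp1, hp2⟩)
              · rcases List.mem_cons.mp hr' with h | h
                · rw [h] at hp1 hp2
                  exact ⟨(r.1, max r.2 (i + 3)), List.mem_cons_self, hp1, by simp only; omega⟩
                · exact ⟨r', List.mem_cons_of_mem _ h, hp1, hp2⟩
              · exact ⟨(r.1, max r.2 (i + 3)), List.mem_cons_self, by omega, by simp only; omega⟩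
        · have hbm : bMergeStep (r :: rest) i = (i - 3, i + 3) :: r :: rest := by
            simp [bMergeStep, hmerge]
          rw [hbm]
          have hall : ∀ r' ∈ r :: rest, r'.2 + 2 ≤ i - 3 := by
            intro r' hr'
            rcases List.mem_cons.mp hr' with h | h
            · subst h; omega
            · have h1 := hr_rest r' h
              omega
          refine ⟨List.pairwise_cons.mpr ⟨hall, hpw⟩, ?_, ?_, by simp, fun p => ?_⟩
          · intro r' hr'
            rcases List.mem_cons.mp hr' with h | h
            · subst h; simp; omega
            · exact hle r' h
          · intro r' hr' x hx
            rcases List.mem_cons.mp hr' with h | h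
            · subst h; simp; have := hsle x hx; omega
            · exact hlo r' h x (List.mem_cons_of_mem _ hx)
          · constructor
            · rintro ⟨r', hr', hp1, hp2⟩
              rcases List.mem_cons.mp hr' with h | h
              · subst h; right; simp only at hp1 hp2; omega
              · exact Or.inl ⟨r', h, hp1, hp2⟩
            · rintro (⟨r', hr', hp1, hp2⟩ | ⟨hp1, hp2⟩)
              · exact ⟨r', List.mem_cons_of_mem _ hr', hp1, hp2⟩
              · exact ⟨(i - 3, i + 3), List.mem_cons_self, by omega, by omega⟩
    obtain ⟨s1, s2, s3, s4, s5⟩ := hstep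
    obtain ⟨t1, t2, t3, t4⟩ := ih (bMergeStep acc i) hsorted' s1 s2 s3
    refine ⟨t1, t2, ?_, fun p => ?_⟩
    · rw [t3]
      constructor
      · rintro ⟨h, -⟩; exact absurd h s4
      · rintro ⟨-, h⟩; exact absurd h (by simp)
    · rw [t4 p, s5 p]
      have : Cov (i :: l') p ↔ (i - 3 ≤ p ∧ p ≤ i + 3) ∨ Cov l' p := by simp [Cov]
      rw [this]
      exact or_assoc

-- ---- flatten of runs ----

def flatRuns (R : List (Int × Int)) : List Int :=
  (R.map (fun r => PySem.List.pyRange r.1 (r.2 + 1) 1)).flatten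

lemma tailEmit_append (w : Int → String) (prev : Int) (xs ys : List Int) :
    tailEmit w prev (xs ++ ys) = tailEmit w prev xs ++ tailEmit w (xs.getLastD prev) ys := by
  induction xs generalizing prev with
  | nil => simp [tailEmit]
  | cons c t ih =>
    simp only [List.cons_append, tailEmit, ih, List.append_assoc]
    congr 2
    cases t <;> simp [List.getLast?_cons]

lemma tailEmit_run (w : Int → String) (c : Int) (e : Int) :
    tailEmit w c (PySem.List.pyRange (c + 1) e 1) = (PySem.List.pyRange (c + 1) e 1).map w := by
  induction hn : (e - (c + 1)).toNat generalizing c with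
  | zero =>
    have : e ≤ c + 1 := by omega
    rw [PySem.List.pyRange_one_eq_nil this]; rfl
  | succ n ih =>
    have hlt : c + 1 < e := by omega
    rw [PySem.List.pyRange_one_cons hlt]
    have h1 : ¬ (c + 1 - c > 1) := by omega
    have h2 : c + 1 + 1 = (c + 1) + 1 := rfl
    simp only [tailEmit, if_neg h1, List.map_cons, List.nil_append]
    rw [ih (c + 1) (by omega)]
    simp

lemma restTail (w : Int → String) (R : List (Int × Int)) (prev : Int)
    (hle : ∀ r ∈ R, r.1 ≤ r.2)
    (hpw : R.Pairwise (fun r r' => r.2 + 2 ≤ r'.1))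
    (hfirst : ∀ r ∈ R.head?, prev + 2 ≤ r.1) :
    tailEmit w prev (flatRuns R) = restB w R := by
  induction R generalizing prev with
  | nil => simp [flatRuns, tailEmit, restB]
  | cons r R' ih =>
    obtain ⟨hpwh, hpw'⟩ := List.pairwise_cons.mp hpw
    have hrle : r.1 ≤ r.2 := hle r List.mem_cons_self
    have hchunk : PySem.List.pyRange r.1 (r.2 + 1) 1 = r.1 :: PySem.List.pyRange (r.1 + 1) (r.2 + 1) 1 :=
      PySem.List.pyRange_one_cons (by omega)
    have hlast : (PySem.List.pyRange r.1 (r.2 + 1) 1).getLastD prev = r.2 := by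
      rw [PySem.List.pyRange_one_succ_right (by omega)]
      simp
    have hflat : flatRuns (r :: R') = PySem.List.pyRange r.1 (r.2 + 1) 1 ++ flatRuns R' := by
      simp [flatRuns]
    rw [hflat, tailEmit_append, hlast]
    have hfirst' : ∀ r' ∈ R'.head?, r.2 + 2 ≤ r'.1 := by
      intro r' hr'
      exact hpwh r' (List.mem_of_mem_head? hr')
    rw [ih r.2 (fun r' hr' => hle r' (List.mem_cons_of_mem _ hr')) hpw' hfirst']
    have hgap : r.1 - prev > 1 := by
      have := hfirst r (by simp)
      omega
    rw [hchunk]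
    simp only [tailEmit, if_pos hgap, tailEmit_run]
    simp [restB, emitRun, hchunk]

lemma emitA_flat (w : Int → String) (R : List (Int × Int))
    (hle : ∀ r ∈ R, r.1 ≤ r.2)
    (hpw : R.Pairwise (fun r r' => r.2 + 2 ≤ r'.1)) :
    emitA w (flatRuns R) = partsB w R := by
  cases R with
  | nil => simp [flatRuns, emitA, partsB]
  | cons r R' =>
    obtain ⟨hpwh, hpw'⟩ := List.pairwise_cons.mp hpw
    have hrle : r.1 ≤ r.2 := hle r List.mem_cons_self
    have hchunk : PySem.List.pyRange r.1 (r.2 + 1) 1 = r.1 :: PySem.List.pyRange (r.1 + 1) (r.2 + 1) 1 :=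
      PySem.List.pyRange_one_cons (by omega)
    have hflat : flatRuns (r :: R') = PySem.List.pyRange r.1 (r.2 + 1) 1 ++ flatRuns R' := by
      simp [flatRuns]
    have hlast : (PySem.List.pyRange (r.1 + 1) (r.2 + 1) 1).getLastD r.1 = r.2 := by
      by_cases h : r.1 = r.2
      · rw [PySem.List.pyRange_one_eq_nil (by omega)]; simpa using h
      · rw [PySem.List.pyRange_one_succ_right (by omega)]; simp
    rw [hflat, hchunk]
    simp only [List.cons_append, emitA]
    rw [tailEmit_append, hlast]
    rw [tailEmit_run]
    have hfirst' : ∀ r' ∈ R'.head?, r.2 + 2 ≤ r'.1 := by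
      intro r' hr'
      exact hpwh r' (List.mem_of_mem_head? hr')
    rw [restTail w R' r.2 (fun r' hr' => hle r' (List.mem_cons_of_mem _ hr')) hpw' hfirst']
    simp [partsB, emitRun, hchunk]

lemma getLast_flat (R : List (Int × Int)) (h : R ≠ [])
    (hle : ∀ r ∈ R, r.1 ≤ r.2) :
    (flatRuns R).getLastD 0 = (R.getLast h).2 := by
  induction R with
  | nil => exact absurd rfl h
  | cons r R' ih =>
    cases R' with
    | nil =>
      have hrle : r.1 ≤ r.2 := hle r List.mem_cons_self
      show ((([r].map (fun r => PySem.List.pyRange r.1 (r.2 + 1) 1)).flatten).getLastD 0) = _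
      simp only [List.map_cons, List.map_nil, List.flatten_cons, List.flatten_nil,
        List.append_nil, List.getLast_singleton]
      rw [PySem.List.pyRange_one_succ_right (by omega)]
      simp
    | cons r' R'' =>
      have hle' : ∀ x ∈ r' :: R'', x.1 ≤ x.2 := fun x hx => hle x (List.mem_cons_of_mem _ hx)
      have hne' : (r' :: R'' : List (Int × Int)) ≠ [] := by simp
      have hfne : flatRuns (r' :: R'') ≠ [] := by
        have hrle : r'.1 ≤ r'.2 := hle' r' List.mem_cons_self
        have : PySem.List.pyRange r'.1 (r'.2 + 1) 1 ≠ [] := by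
          rw [PySem.List.pyRange_one_cons (by omega)]; simp
        simp only [flatRuns, List.map_cons, List.flatten_cons, ne_eq, List.append_eq_nil_iff]
        intro ⟨h1, _⟩; exact this h1
      have hflat : flatRuns (r :: r' :: R'') = PySem.List.pyRange r.1 (r.2 + 1) 1 ++ flatRuns (r' :: R'') := by
        simp [flatRuns]
      rw [hflat]
      rw [List.getLastD_eq_getLast?, List.getLast?_append,
        List.getLast?_eq_some_getLast hfne]
      simp only [Option.some_or, Option.getD_some]
      have h2 : (flatRuns (r' :: R'')).getLast hfne = ((r' :: R'').getLast hne').2 := by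
        have h3 := ih hne' hle'
        rwa [List.getLastD_eq_getLast?, List.getLast?_eq_some_getLast hfne, Option.getD_some] at h3
      rw [h2, List.getLast_cons hne']

-- ---- the sorted set list equals the flattened runs ----

lemma sorted_eq_flat (indexes : List Int) :
    PySem.List.sorted (indexes.foldl (fun s index =>
      PySem.Set.union
        (PySem.Set.union s (PySem.Set.ofList (PySem.List.pyRange (index - 3) (index + 1) 1)))
        (PySem.Set.ofList (PySem.List.pyRange (index + 1) (index + 4) 1))) PySem.Set.empty)
      (fun x => x) false
    = flatRuns (((PySem.List.sorted indexes (fun x => x) false).foldl bMergeStep []).reverse) := by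
  obtain ⟨hSnd, hSmem⟩ := setA_spec indexes PySem.Set.empty (by simp [PySem.Set.empty])
  have hs : (PySem.List.sorted indexes (fun x => x) false).Pairwise (· ≤ ·) := by
    have := PySem.List.sorted_pairwise (xs := indexes) (key := fun x => x)
    simpa using this
  obtain ⟨hpw, hle, -, hcov⟩ := merge_go (PySem.List.sorted indexes (fun x => x) false) [] hs
    (by simp) (by simp) (by simp)
  set res := (PySem.List.sorted indexes (fun x => x) false).foldl bMergeStep [] with hres
  set R := res.reverse with hR
  have hleR : ∀ r ∈ R, r.1 ≤ r.2 := fun r hr => hle r (by simpa [hR] using hr)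
  have hpwR : R.Pairwise (fun r r' => r.2 + 2 ≤ r'.1) := by
    rw [hR, List.pairwise_reverse]; exact hpw
  -- membership of the flattened runs
  have hFmem : ∀ p, p ∈ flatRuns R ↔ Cov indexes p := by
    intro p
    have h1 : p ∈ flatRuns R ↔ ∃ r ∈ R, r.1 ≤ p ∧ p ≤ r.2 := by
      simp only [flatRuns, List.mem_flatten, List.mem_map]
      constructor
      · rintro ⟨l, ⟨r, hr, rfl⟩, hp⟩
        rw [PySem.List.mem_pyRange_one] at hp
        exact ⟨r, hr, by omega⟩
      · rintro ⟨r, hr, h⟩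
        exact ⟨_, ⟨r, hr, rfl⟩, PySem.List.mem_pyRange_one.mpr (by omega)⟩
    rw [h1]
    have h2 : (∃ r ∈ R, r.1 ≤ p ∧ p ≤ r.2) ↔ ∃ r ∈ res, r.1 ≤ p ∧ p ≤ r.2 := by
      simp [hR]
    rw [h2, hcov p]
    simp only [List.not_mem_nil, false_and, exists_false, false_or]
    unfold Cov
    constructor
    · rintro ⟨i, hi, h⟩
      exact ⟨i, (PySem.List.mem_sorted _ _ _ _).mp hi, h⟩
    · rintro ⟨i, hi, h⟩
      exact ⟨i, (PySem.List.mem_sorted _ _ _ _).mpr hi, h⟩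
  -- strict ordering of the flattened runs
  have hFpw : (flatRuns R).Pairwise (· < ·) := by
    rw [flatRuns, List.pairwise_flatten]
    constructor
    · intro l hl
      obtain ⟨r, -, rfl⟩ := List.mem_map.mp hl
      exact PySem.List.pairwise_lt_pyRange_one _ _
    · rw [List.pairwise_map]
      refine hpwR.imp ?_
      intro r r' hrel x hx y hy
      rw [PySem.List.mem_pyRange_one] at hx hy
      omega
  have hFnd : (flatRuns R).Nodup := hFpw.imp (fun h => ne_of_lt h)
  refine PySem.List.sorted_eq_of_perm_of_pairwise_lt _ _ _ ?_ hFpw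
  refine (List.perm_ext_iff_of_nodup hFnd hSnd).mpr ?_
  intro a
  rw [hFmem a, hSmem a]
  simp


-- ===== VERDICT (by name: the statement is the Claim_ definition above) =====
-- runs of the merge fold: basic properties packaged for the main proof
lemma runs_props (indexes : List Int) :
    let res := (PySem.List.sorted indexes (fun x => x) false).foldl bMergeStep []
    res.Pairwise (fun r r' => r'.2 + 2 ≤ r.1) ∧ (∀ r ∈ res, r.1 ≤ r.2) ∧
    (res = [] ↔ indexes = []) := by
  intro res
  have hs : (PySem.List.sorted indexes (fun x => x) false).Pairwise (· ≤ ·) := by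
    have := PySem.List.sorted_pairwise (xs := indexes) (key := fun x => x)
    simpa using this
  have h := merge_go (PySem.List.sorted indexes (fun x => x) false) [] hs
    (by simp) (by simp) (by simp)
  refine ⟨h.1, h.2.1, ?_⟩
  rw [h.2.2.1]
  simp [PySem.List.sorted_eq_nil_iff]

theorem find_snippet_spec : Claim_equal_find_snippet := by
  intro doc idx _ hPre
  obtain ⟨hne, -⟩ := hPre
  unfold Spec_find_snippet find_snippet find_snippet_alt
  have hprops := runs_props idx
  set res := (PySem.List.sorted idx (fun x => x) false).foldl bMergeStep [] with hres
  obtain ⟨hpw, hle, hnil⟩ := hprops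
  set R := res.reverse with hR
  have hleR : ∀ r ∈ R, r.1 ≤ r.2 := by intro r hr; exact hle r (by simpa [hR] using hr)
  have hpwR : R.Pairwise (fun r r' => r.2 + 2 ≤ r'.1) := by
    rw [hR, List.pairwise_reverse]; exact hpw
  have hRne : R ≠ [] := by
    simp only [hR, ne_eq, List.reverse_eq_nil_iff]
    intro h; exact hne (hnil.mp h)
  have hflat := sorted_eq_flat idx
  simp only [] at *
  rw [hflat, loopA_eq (fun p => (PySem.List.pyGet? doc p).getD "") (flatRuns R),
      loopB_eq (fun p => (PySem.List.pyGet? doc p).getD "") R,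
      emitA_flat (fun p => (PySem.List.pyGet? doc p).getD "") R hleR hpwR]
  -- final ellipsis condition
  have hlast : PySem.List.pyGetD (flatRuns R) (-1) 0 = ((R.getLast?).map (·.2)).getD 0 := by
    have hfne : flatRuns R ≠ [] := by
      rcases List.exists_cons_of_ne_nil hRne with ⟨r, R', hcons⟩
      have hr : r ∈ R := by rw [hcons]; exact List.mem_cons_self
      have : PySem.List.pyRange r.1 (r.2 + 1) 1 ≠ [] := by
        have := hleR r hr
        rcases PySem.List.pyRange_one_cons (a := r.1) (b := r.2 + 1) (by omega) with h
        simp [h]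
      simp only [flatRuns, hcons, List.map_cons, List.flatten_cons, ne_eq, List.append_eq_nil_iff]
      intro ⟨h1, _⟩; exact this h1
    rw [PySem.List.pyGetD_neg_one (flatRuns R) 0 hfne]
    have h2 : (flatRuns R).getLast hfne = (flatRuns R).getLastD 0 := by
      rw [List.getLastD_eq_getLast?, List.getLast?_eq_some_getLast hfne]; rfl
    rw [h2, getLast_flat R hRne hleR, List.getLast?_eq_some_getLast hRne]
    rfl
  rw [hlast]
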